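-- pv_equiv track=rewrite | github.com/GrahamTheCoder/gitsnow | cli/dependencies.py | build_table_dependency_paths
-- ===== SOURCE A (Python) =====
-- def build_table_dependency_paths(
--     target_table: str,
--     dependencies_by_obj: dict[str, set[str]],
--     max_depth: int = 10,
-- ) -> list[list[str]]:
--     """
--     Build table dependency paths in source -> target order.
--     """
--
--     def _dfs(current: str, depth: int, visiting: set[str]) -> list[list[str]]:
--         if current in visiting:
--             return []
--         if depth <= 0:
--             return [[current]]
--
--         deps = dependencies_by_obj.get(current)
--         if not deps:
--             return [[current]]
--
--         visiting.add(current)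
--         paths: list[list[str]] = []
--         for dep in sorted(deps):
--             for sub_path in _dfs(dep, depth - 1, visiting):
--                 paths.append(sub_path + [current])
--         visiting.remove(current)
--         return paths
--
--     return _dfs(target_table, max_depth, set())
-- ===== SOURCE B (Python) =====
-- def build_table_dependency_paths(
--     target_table: str,
--     dependencies_by_obj: dict[str, set[str]],
--     max_depth: int = 10,
-- ) -> list[list[str]]:
--     """
--     Build table dependency paths in source -> target order (iterative DFS
--     with an explicit stack instead of recursion).
--     """
--     paths: list[list[str]] = []
--     stack = [(target_table, max_depth, [], frozenset())]
--     while stack: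
--         node, depth, suffix, visiting = stack.pop()
--         if node in visiting:
--             continue
--         deps = dependencies_by_obj.get(node)
--         if depth <= 0 or not deps:
--             paths.append([node] + suffix)
--             continue
--         new_suffix = [node] + suffix
--         new_visiting = visiting | {node}
--         for dep in reversed(sorted(deps)):
--             stack.append((dep, depth - 1, new_suffix, new_visiting))
--     return paths
-- ===== Notes on version B (the rewrite author's own statement) =====
-- stated objective: alternative
-- what changed: A's recursive DFS with an implicit call stack is replaced by an iterative DFS over an explicit stack of (node, depth, suffix, visiting) frames with a result accumulator, pushing reversed-sorted dependencies so paths are emitted in the same leftmost-sorted order.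
import Mathlib
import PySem

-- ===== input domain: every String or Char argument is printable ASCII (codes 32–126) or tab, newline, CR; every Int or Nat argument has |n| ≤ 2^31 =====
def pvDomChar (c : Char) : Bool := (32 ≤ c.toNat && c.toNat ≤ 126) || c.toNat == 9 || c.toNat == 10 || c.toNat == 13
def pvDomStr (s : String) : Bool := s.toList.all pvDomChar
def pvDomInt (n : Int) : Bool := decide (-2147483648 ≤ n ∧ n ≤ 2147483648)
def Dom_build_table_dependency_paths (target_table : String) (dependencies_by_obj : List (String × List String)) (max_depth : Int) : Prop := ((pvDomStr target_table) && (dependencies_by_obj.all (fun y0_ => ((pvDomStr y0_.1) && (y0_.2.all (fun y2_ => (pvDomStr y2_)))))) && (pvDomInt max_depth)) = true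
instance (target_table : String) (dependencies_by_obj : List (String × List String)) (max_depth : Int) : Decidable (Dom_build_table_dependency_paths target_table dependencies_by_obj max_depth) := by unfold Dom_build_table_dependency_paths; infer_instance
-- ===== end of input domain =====

-- B replaces A's recursive DFS by an iterative DFS over an explicit stack of
-- (node, depth, suffix, visiting) frames with a result accumulator (same cost,
-- different decomposition).  Both programs are pure on the return value.

-- ===== PORT A =====
-- A's nested _dfs; `visiting` is passed functionally (the add/remove pair of the
-- Python brackets the recursive calls, so each call sees visiting ∪ {current}).
def pvDfsA (dependencies_by_obj : List (String × List String)) (current : String) (depth : Int) (visiting : PySem.Set String) : List (List String) :=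
  if current ∈ visiting then []
  else if depth ≤ 0 then [[current]]
  else
    match (PySem.Dict.mk dependencies_by_obj).get? current with
    | none => [[current]]                      -- `if not deps` on a missing key
    | some deps =>
      if deps = [] then [[current]]            -- `if not deps` on an empty set
      else
        (PySem.List.sorted deps (fun x => x) false).foldl
          (fun paths dep =>
            (pvDfsA dependencies_by_obj dep (depth - 1) (PySem.Set.add visiting current)).foldl
              (fun ps sub_path => ps ++ [sub_path ++ [current]]) paths)
          []
termination_by depth.toNat
decreasing_by omega

def build_table_dependency_paths (target_table : String) (dependencies_by_obj : List (String × List String)) (max_depth : Int) : List (List String) :=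
  pvDfsA dependencies_by_obj target_table max_depth PySem.Set.empty

-- ===== PORT B =====
-- helpers the port needs for its termination measure (stack weight):
def pvMaxDeps (d : List (String × List String)) : Nat :=
  d.foldr (fun p m => max p.2.length m) 0

lemma pvGetLen_le (d : List (String × List String)) (k : String) (ds : List String)
    (h : (PySem.Dict.mk d).get? k = some ds) : ds.length ≤ pvMaxDeps d := by
  induction d with
  | nil => simp [PySem.Dict.get?] at h
  | cons p rest ih =>
    rw [show (PySem.Dict.mk (p :: rest)) = PySem.Dict.mk ((p.1, p.2) :: rest) by rfl,
        PySem.Dict.get?_mk_cons] at h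
    by_cases hk : (p.1 == k) = true
    · simp [hk] at h; subst h; simp [pvMaxDeps]
    · simp [hk] at h
      have := ih h
      simp [pvMaxDeps] at this ⊢
      omega

def pvStackMeasure (C : Nat) (stack : List (String × Int × List String × List String)) : Nat :=
  (stack.map (fun f => (C + 1) ^ (f.2.1.toNat + 1))).sum

lemma pvStackMeasure_foldl_cons (C : Nat) (g : String → String × Int × List String × List String)
    (M : List String) : ∀ rest, pvStackMeasure C (M.foldl (fun st x => g x :: st) rest)
      = (M.map (fun x => (C + 1) ^ ((g x).2.1.toNat + 1))).sum + pvStackMeasure C rest := by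
  induction M with
  | nil => intro rest; simp
  | cons x M ih =>
    intro rest
    simp only [List.foldl_cons, List.map_cons, List.sum_cons, ih]
    simp [pvStackMeasure]; omega

-- the iterative DFS loop of Source B; `stack.pop()` pops the head, the for-loop over
-- reversed(sorted(deps)) pushes frames one by one (the foldl below).
def pvBLoop (d : List (String × List String)) (stack : List (String × Int × List String × List String)) (paths : List (List String)) : List (List String) :=
  match stack with
  | [] => paths
  | (node, depth, suffix, visiting) :: rest =>
    if node ∈ visiting then pvBLoop d rest paths
    else
      let deps := (PySem.Dict.mk d).get? node
      if depth ≤ 0 ∨ deps.getD [] = [] then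
        pvBLoop d rest (paths ++ [node :: suffix])
      else
        pvBLoop d ((PySem.List.sorted (deps.getD []) (fun x => x) false).reverse.foldl
            (fun st dep => (dep, depth - 1, node :: suffix, PySem.Set.add visiting node) :: st) rest)
          paths
termination_by pvStackMeasure (pvMaxDeps d) stack
decreasing_by
  · simp [pvStackMeasure]
  · simp [pvStackMeasure]
  · rename_i h1 h2
    rw [not_or] at h2
    obtain ⟨hd, hne⟩ := h2
    rcases hget : (PySem.Dict.mk d).get? node with _ | ds
    · simp [deps, hget] at hne
    · have hlen : ds.length ≤ pvMaxDeps d := pvGetLen_le d node ds hget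
      rw [pvStackMeasure_foldl_cons]
      have hexp : (depth - 1).toNat + 1 = depth.toNat := by omega
      simp only [deps, hget, Option.getD_some, hexp]
      rw [List.map_const', List.sum_replicate, smul_eq_mul, List.length_reverse,
          PySem.List.length_sorted]
      simp only [pvStackMeasure, List.map_cons, List.sum_cons]
      rw [pow_succ]
      have hpow : 0 < (pvMaxDeps d + 1) ^ depth.toNat := pow_pos (Nat.succ_pos _) _
      have hmul : ds.length * (pvMaxDeps d + 1) ^ depth.toNat
          < (pvMaxDeps d + 1) ^ depth.toNat * (pvMaxDeps d + 1) := by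
        calc ds.length * (pvMaxDeps d + 1) ^ depth.toNat
            ≤ pvMaxDeps d * (pvMaxDeps d + 1) ^ depth.toNat := Nat.mul_le_mul_right _ hlen
          _ < (pvMaxDeps d + 1) * (pvMaxDeps d + 1) ^ depth.toNat :=
              Nat.mul_lt_mul_of_pos_right (Nat.lt_succ_self _) hpow
          _ = (pvMaxDeps d + 1) ^ depth.toNat * (pvMaxDeps d + 1) := Nat.mul_comm _ _
      omega

def build_table_dependency_paths_alt (target_table : String) (dependencies_by_obj : List (String × List String)) (max_depth : Int) : List (List String) :=
  pvBLoop dependencies_by_obj [(target_table, max_depth, [], PySem.Set.empty)] []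

-- ===== PRECONDITION & SPEC =====
def Spec_build_table_dependency_paths (target_table : String) (dependencies_by_obj : List (String × List String)) (max_depth : Int) (out : List (List String)) : Prop := out = build_table_dependency_paths_alt target_table dependencies_by_obj max_depth
instance (target_table : String) (dependencies_by_obj : List (String × List String)) (max_depth : Int) (out : List (List String)) : Decidable (Spec_build_table_dependency_paths target_table dependencies_by_obj max_depth out) := by unfold Spec_build_table_dependency_paths; infer_instance

-- ===== CLAIM (what is proved, stated in full; the proofs are below) =====
def Claim_equal_build_table_dependency_paths : Prop := ∀ (target_table : String) (dependencies_by_obj : List (String × List String)) (max_depth : Int), Dom_build_table_dependency_paths target_table dependencies_by_obj max_depth → Spec_build_table_dependency_paths target_table dependencies_by_obj max_depth (build_table_dependency_paths target_table dependencies_by_obj max_depth)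

-- ===== LEMMAS AND PROOFS =====

-- what one stack frame of B contributes: A's result for that node, each path
-- extended by the frame's accumulated suffix
def pvContrib (d : List (String × List String)) (f : String × Int × List String × List String) : List (List String) :=
  (pvDfsA d f.1 f.2.1 f.2.2.2).map (· ++ f.2.2.1)

lemma pvDfsA_skip (d : List (String × List String)) (node : String) (depth : Int)
    (vis : PySem.Set String) (h : node ∈ vis) : pvDfsA d node depth vis = [] := by
  rw [pvDfsA]; simp [h]

lemma pvDfsA_leaf (d : List (String × List String)) (node : String) (depth : Int)
    (vis : PySem.Set String) (h1 : node ∉ vis)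
    (h2 : depth ≤ 0 ∨ ((PySem.Dict.mk d).get? node).getD [] = []) :
    pvDfsA d node depth vis = [[node]] := by
  rw [pvDfsA]
  rcases h2 with h2 | h2
  · simp [h1, h2]
  · rcases hget : (PySem.Dict.mk d).get? node with _ | ds
    · simp [h1]
    · rw [hget] at h2; simp at h2
      simp [h1, h2]

lemma pvDfsA_push (d : List (String × List String)) (node : String) (depth : Int)
    (vis : PySem.Set String) (ds : List String) (h1 : node ∉ vis) (h2 : ¬ depth ≤ 0)
    (h3 : (PySem.Dict.mk d).get? node = some ds) (h4 : ds ≠ []) :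
    pvDfsA d node depth vis
      = (PySem.List.sorted ds (fun x => x) false).flatMap
          (fun dep => (pvDfsA d dep (depth - 1) (PySem.Set.add vis node)).map (· ++ [node])) := by
  rw [pvDfsA]
  simp only [h1, h3]
  simp [h2, h4, ← List.flatMap_def]
  apply List.flatMap_congr
  intro x _
  exact (List.map_eq_flatMap).symm

lemma pvFoldl_push_eq {α β : Type} (g : α → β) (M : List α) :
    ∀ rest, M.foldl (fun st x => g x :: st) rest = (M.map g).reverse ++ rest := by
  induction M with
  | nil => intro rest; simp
  | cons x M ih => intro rest; simp [ih]

lemma pvBLoop_eq (d : List (String × List String))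
    (stack : List (String × Int × List String × List String)) (paths : List (List String)) :
    pvBLoop d stack paths = paths ++ stack.flatMap (pvContrib d) := by
  fun_induction pvBLoop d stack paths with
  | case1 paths => simp
  | case2 paths node depth suffix visiting rest h ih =>
    rw [ih]
    simp [pvContrib, pvDfsA_skip d node depth visiting h]
  | case3 paths node depth suffix visiting rest h1 deps h2 ih =>
    rw [ih]
    simp [pvContrib, pvDfsA_leaf d node depth visiting h1 h2]
  | case4 paths node depth suffix visiting rest h1 deps h2 ih =>
    rw [ih]
    rw [not_or] at h2
    obtain ⟨hd, hne⟩ := h2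
    obtain ⟨ds, hget⟩ : ∃ ds, (PySem.Dict.mk d).get? node = some ds :=
      Option.ne_none_iff_exists'.mp
        (fun hn => hne (by rw [show deps = (PySem.Dict.mk d).get? node from rfl, hn]; rfl))
    have hne' : ds ≠ [] := by
      rw [show deps = (PySem.Dict.mk d).get? node from rfl, hget] at hne; simpa using hne
    simp only [deps, hget, Option.getD_some]
    rw [pvFoldl_push_eq]
    simp only [List.map_reverse, List.reverse_reverse]
    rw [List.flatMap_append, List.flatMap_map, List.flatMap_cons]
    have hA := pvDfsA_push d node depth visiting ds h1 hd hget hne'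
    simp only [pvContrib, hA, List.map_flatMap, List.map_map]
    congr 2
    apply List.flatMap_congr
    intro dep _
    simp [Function.comp_def, List.append_assoc]

-- ===== VERDICT (by name: the statement is the Claim_ definition above) =====
theorem build_table_dependency_paths_spec : Claim_equal_build_table_dependency_paths := by
  intro target_table d max_depth _
  unfold Spec_build_table_dependency_paths build_table_dependency_paths build_table_dependency_paths_alt
  rw [pvBLoop_eq]
  simp [pvContrib]
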